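-- pv_equiv track=rewrite | github.com/dlist7/advent-of-code-2022-python | day22a.py | update_south
-- ===== SOURCE A (Python) =====
-- def update_south(monkey_map, r0, c0, r, c):
--     if r < len(monkey_map) - 1:
--         if monkey_map[r+1][c] == '.':
--             return (r+1,c)
--         elif monkey_map[r+1][c] == '#':
--             return (r0,c0)
--         else:
--             return update_south(monkey_map, r0, c0, r+1, c)
--     else:
--         if monkey_map[0][c] == '.':
--             return (0,c)
--         elif monkey_map[0][c] == '#':
--             return (r0,c0)
--         else:
--             return update_south(monkey_map, r0, c0, 0, c)
-- ===== SOURCE B (Python) =====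
-- def update_south(monkey_map, r0, c0, r, c):
--     # Scan the rows in southward wrap order (r+1..n-1, then 0..r) and let the
--     # first non-blank cell in column c decide the result.
--     n = len(monkey_map)
--     for rows in (range(r + 1, n), range(r + 1)):
--         for i in rows:
--             ch = monkey_map[i][c]
--             if ch == '.':
--                 return (i, c)
--             if ch == '#':
--                 return (r0, c0)
--     raise ValueError("no open or wall tile in column")
-- ===== Notes on version B (the rewrite author's own statement) =====
-- stated objective: alternative
-- what changed: The tail recursion with two wrap branches is replaced by building the southward wrap order of row indices once (range(r+1,n)+range(0,r+1)) and doing a single linear scan for the first non-blank cell in that column.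
import Mathlib
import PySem

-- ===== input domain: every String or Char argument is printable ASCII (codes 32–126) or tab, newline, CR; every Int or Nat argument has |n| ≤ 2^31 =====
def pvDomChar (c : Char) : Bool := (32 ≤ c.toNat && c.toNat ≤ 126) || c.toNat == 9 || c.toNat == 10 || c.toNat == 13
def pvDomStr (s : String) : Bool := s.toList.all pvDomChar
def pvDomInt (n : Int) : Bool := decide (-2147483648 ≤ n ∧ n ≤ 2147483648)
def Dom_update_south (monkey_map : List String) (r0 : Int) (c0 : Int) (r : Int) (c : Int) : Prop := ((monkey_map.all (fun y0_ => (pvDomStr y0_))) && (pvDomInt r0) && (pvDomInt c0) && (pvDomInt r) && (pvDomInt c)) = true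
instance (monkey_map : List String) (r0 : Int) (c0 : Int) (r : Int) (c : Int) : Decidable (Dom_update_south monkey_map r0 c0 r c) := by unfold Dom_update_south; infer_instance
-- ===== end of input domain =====

-- B replaces A's tail recursion by one linear scan over the southward wrap order of the
-- rows ('alternative' objective, same O(n) cost); equivalence is proved on Pre_: the
-- inputs on which the Python A terminates normally.

-- monkey_map[i][c] as both Pythons evaluate it (negative indices wrap; none = IndexError)
def pvCell (monkey_map : List String) (i : Int) (c : Int) : Option Char :=
  match PySem.List.pyGet? monkey_map i with
  | some row => PySem.Str.pyGet? row c
  | none => none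

-- ===== PORT A =====
-- A's recursion, made total with fuel; fuel 0 is unreachable under Pre_update_south
def updSouthGo (monkey_map : List String) (r0 : Int) (c0 : Int) (c : Int) : Nat → Int → Int × Int
  | 0, _ => (r0, c0)          -- fuel exhausted: A would recurse further (never under Pre_)
  | Nat.succ fuel, r =>
    if r < (monkey_map.length : Int) - 1 then
      match pvCell monkey_map (r + 1) c with
      | some ch =>
          if ch = '.' then (r + 1, c)
          else if ch = '#' then (r0, c0)
          else updSouthGo monkey_map r0 c0 c fuel (r + 1)
      | none => (r0, c0)      -- Python raises IndexError here: outside Pre_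
    else
      match pvCell monkey_map 0 c with
      | some ch =>
          if ch = '.' then (0, c)
          else if ch = '#' then (r0, c0)
          else updSouthGo monkey_map r0 c0 c fuel 0
      | none => (r0, c0)      -- Python raises IndexError here: outside Pre_

def update_south (monkey_map : List String) (r0 : Int) (c0 : Int) (r : Int) (c : Int) : Int × Int :=
  updSouthGo monkey_map r0 c0 c (monkey_map.length + 1 + r.natAbs) r

-- ===== PORT B =====
-- Source B's inner loop 'for i in range(i, e): …' (none = the range was exhausted)
def scanRows (monkey_map : List String) (r0 : Int) (c0 : Int) (c : Int) (i : Int) (e : Int) : Option (Int × Int) :=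
  if i < e then
    match pvCell monkey_map i c with
    | some ch =>
        if ch = '.' then some (i, c)
        else if ch = '#' then some (r0, c0)
        else scanRows monkey_map r0 c0 c (i + 1) e
    | none => some (r0, c0)   -- Source B raises IndexError here: outside Pre_
  else none
termination_by (e - i).toNat
decreasing_by omega

-- Source B's outer loop over the two ranges range(r+1, n) and range(r+1)
def update_south_alt (monkey_map : List String) (r0 : Int) (c0 : Int) (r : Int) (c : Int) : Int × Int :=
  match scanRows monkey_map r0 c0 c (r + 1) (monkey_map.length : Int) with
  | some v => v
  | none =>
      match scanRows monkey_map r0 c0 c 0 (r + 1) with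
      | some v => v
      | none => (r0, c0)      -- Source B raises ValueError here: outside Pre_

-- ===== PRECONDITION & SPEC =====
def pvBlankB (o : Option Char) : Bool :=
  match o with
  | some ch => !(ch == '.') && !(ch == '#')
  | none => false

def pvStopB (o : Option Char) : Bool := (o == some '.') || (o == some '#')

-- the southward wrap order of row indices, with both ends clamped to at most one
-- out-of-range index so the list stays small for every admitted r (the clamps cut only
-- indices that lie beyond an out-of-range cell, where A has already raised)
def pvOrderC (monkey_map : List String) (r : Int) : List Int :=
  PySem.List.pyRange (max (r + 1) (-(monkey_map.length : Int) - 1)) (monkey_map.length : Int) 1 ++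
  PySem.List.pyRange 0 (min (r + 1) ((monkey_map.length : Int) + 1)) 1

-- Pre_: exactly the inputs on which the Python A returns (no exception, no divergence):
-- scanning column c southward from row r with wraparound, a '.' or '#' cell appears, and
-- every cell before it exists and is blank.
def Pre_update_south (monkey_map : List String) (r0 : Int) (c0 : Int) (r : Int) (c : Int) : Prop :=
  ∃ j : Nat, j < (pvOrderC monkey_map r).length ∧
    pvStopB (pvCell monkey_map ((pvOrderC monkey_map r).getD j 0) c) = true ∧
    ∀ k : Nat, k < j → pvBlankB (pvCell monkey_map ((pvOrderC monkey_map r).getD k 0) c) = true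

instance (monkey_map : List String) (r0 : Int) (c0 : Int) (r : Int) (c : Int) : Decidable (Pre_update_south monkey_map r0 c0 r c) := by unfold Pre_update_south; infer_instance

def pvWitness_update_south : List String × Int × Int × Int × Int := ([" .", "#."], 0, 0, 0, 1)

def Spec_update_south (monkey_map : List String) (r0 : Int) (c0 : Int) (r : Int) (c : Int) (out : Int × Int) : Prop := out = update_south_alt monkey_map r0 c0 r c
instance (monkey_map : List String) (r0 : Int) (c0 : Int) (r : Int) (c : Int) (out : Int × Int) : Decidable (Spec_update_south monkey_map r0 c0 r c out) := by unfold Spec_update_south; infer_instance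

-- ===== CLAIM (what is proved, stated in full; the proofs are below) =====
def Claim_equal_update_south : Prop := ∀ (monkey_map : List String) (r0 : Int) (c0 : Int) (r : Int) (c : Int), Dom_update_south monkey_map r0 c0 r c → Pre_update_south monkey_map r0 c0 r c → Spec_update_south monkey_map r0 c0 r c (update_south monkey_map r0 c0 r c)

-- ===== LEMMAS AND PROOFS =====

-- the value both programs produce at the first stopping row i
def pvRes (monkey_map : List String) (r0 : Int) (c0 : Int) (c : Int) (i : Int) : Int × Int :=
  if pvCell monkey_map i c = some '.' then (i, c) else (r0, c0)

-- the unclamped wrap order (proof-side model of A's visiting order)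
def pvOrder (monkey_map : List String) (r : Int) : List Int :=
  PySem.List.pyRange (r + 1) (monkey_map.length : Int) 1 ++ PySem.List.pyRange 0 (r + 1) 1

-- list model of scanRows
def scanL (monkey_map : List String) (r0 : Int) (c0 : Int) (c : Int) : List Int → Option (Int × Int)
  | [] => none
  | i :: rest =>
      match pvCell monkey_map i c with
      | some ch =>
          if ch = '.' then some (i, c)
          else if ch = '#' then some (r0, c0)
          else scanL monkey_map r0 c0 c rest
      | none => some (r0, c0)

theorem pvStop_cases {o : Option Char} (h : pvStopB o = true) : o = some '.' ∨ o = some '#' := by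
  cases o with
  | none => simp [pvStopB] at h
  | some ch =>
    simp [pvStopB] at h
    rcases h with h | h <;> simp [h]

theorem pvBlank_cases {o : Option Char} (h : pvBlankB o = true) :
    ∃ ch, o = some ch ∧ ch ≠ '.' ∧ ch ≠ '#' := by
  cases o with
  | none => simp [pvBlankB] at h
  | some ch =>
    simp [pvBlankB] at h
    exact ⟨ch, rfl, h.1, h.2⟩

theorem pvSome_of_stop {monkey_map : List String} {i c : Int}
    (h : pvStopB (pvCell monkey_map i c) = true) :
    ∃ row, PySem.List.pyGet? monkey_map i = some row := by
  rcases pvStop_cases h with hs | hs <;>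
  · unfold pvCell at hs
    cases hg : PySem.List.pyGet? monkey_map i with
    | none => rw [hg] at hs; simp at hs
    | some row => exact ⟨row, rfl⟩

theorem pvInRange_of_some {monkey_map : List String} {i : Int} {row : String}
    (h : PySem.List.pyGet? monkey_map i = some row) :
    -(monkey_map.length : Int) ≤ i ∧ i < (monkey_map.length : Int) := by
  have hin : PySem.Raise.InRange monkey_map.length i := by
    by_contra hco
    rw [(PySem.List.pyGet?_eq_none_iff monkey_map i).mpr hco] at h
    simp at h
  unfold PySem.Raise.InRange at hin
  omega

theorem scanRows_eq_scanL (monkey_map : List String) (r0 c0 c : Int) :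
    ∀ (k : Nat) (i e : Int), (e - i).toNat = k →
      scanRows monkey_map r0 c0 c i e = scanL monkey_map r0 c0 c (PySem.List.pyRange i e 1) := by
  intro k
  induction k with
  | zero =>
    intro i e hk
    rw [scanRows, PySem.List.pyRange_one_eq_nil (by omega)]
    simp only [if_neg (by omega : ¬ i < e), scanL]
  | succ m ih =>
    intro i e hk
    have hlt : i < e := by omega
    rw [scanRows, PySem.List.pyRange_one_cons hlt]
    simp only [if_pos hlt, scanL]
    cases pvCell monkey_map i c with
    | none => rfl
    | some ch =>
      by_cases hd : ch = '.'
      · simp [hd]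
      · by_cases hh : ch = '#'
        · simp [hd, hh]
        · simp only [if_neg hd, if_neg hh]
          exact ih (i + 1) e (by omega)

theorem scanL_append (monkey_map : List String) (r0 c0 c : Int) :
    ∀ (l1 l2 : List Int),
      scanL monkey_map r0 c0 c (l1 ++ l2) =
        match scanL monkey_map r0 c0 c l1 with
        | some v => some v
        | none => scanL monkey_map r0 c0 c l2 := by
  intro l1
  induction l1 with
  | nil => intro l2; simp [scanL]
  | cons x l1 ih =>
    intro l2
    simp only [List.cons_append, scanL]
    cases pvCell monkey_map x c with
    | none => rfl
    | some ch =>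
      by_cases hd : ch = '.'
      · simp [hd]
      · by_cases hh : ch = '#'
        · simp [hd, hh]
        · simp only [if_neg hd, if_neg hh]
          exact ih l2

-- B's whole loop returns v as soon as the concatenated scan finds v
theorem alt_eq_of_scanL (monkey_map : List String) (r0 c0 r c : Int) (v : Int × Int)
    (h : scanL monkey_map r0 c0 c (pvOrder monkey_map r) = some v) :
    update_south_alt monkey_map r0 c0 r c = v := by
  unfold pvOrder at h
  rw [scanL_append] at h
  unfold update_south_alt
  rw [scanRows_eq_scanL monkey_map r0 c0 c _ (r + 1) (monkey_map.length : Int) rfl,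
      scanRows_eq_scanL monkey_map r0 c0 c _ 0 (r + 1) rfl]
  cases h1 : scanL monkey_map r0 c0 c (PySem.List.pyRange (r + 1) (monkey_map.length : Int) 1) with
  | some w => rw [h1] at h; simp_all
  | none => rw [h1] at h; simp_all

-- the scan returns the value at the first stopping row
theorem scanL_spec (monkey_map : List String) (r0 c0 c : Int) :
    ∀ (l1 : List Int) (i : Int) (l2 : List Int),
      (∀ x ∈ l1, pvBlankB (pvCell monkey_map x c) = true) →
      pvStopB (pvCell monkey_map i c) = true →
      scanL monkey_map r0 c0 c (l1 ++ i :: l2) = some (pvRes monkey_map r0 c0 c i) := by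
  intro l1
  induction l1 with
  | nil =>
    intro i l2 _ hstop
    rcases pvStop_cases hstop with h | h <;> simp [scanL, pvRes, h]
  | cons x l1 ih =>
    intro i l2 hblank hstop
    obtain ⟨ch, hx, hd, hh⟩ := pvBlank_cases (hblank x (by simp))
    simp only [List.cons_append, scanL, hx, if_neg hd, if_neg hh]
    exact ih i l2 (fun y hy => hblank y (by simp [hy])) hstop

-- rotation of the wrap order one step south
theorem order_rot (monkey_map : List String) (r : Int) (h0 : 0 ≤ r) (h1 : r < (monkey_map.length : Int)) :
    ∃ t : List Int,
      pvOrder monkey_map r = (if r < (monkey_map.length : Int) - 1 then r + 1 else 0) :: t ∧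
      pvOrder monkey_map (if r < (monkey_map.length : Int) - 1 then r + 1 else 0) = t ++ [if r < (monkey_map.length : Int) - 1 then r + 1 else 0] := by
  by_cases hlt : r < (monkey_map.length : Int) - 1
  · simp only [if_pos hlt]
    refine ⟨PySem.List.pyRange (r + 1 + 1) (monkey_map.length : Int) 1 ++ PySem.List.pyRange 0 (r + 1) 1, ?_, ?_⟩
    · unfold pvOrder
      rw [PySem.List.pyRange_one_cons (by omega)]
      simp
    · unfold pvOrder
      rw [PySem.List.pyRange_one_succ_right (by omega : (0:Int) ≤ r + 1)]
      simp
  · simp only [if_neg hlt]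
    refine ⟨PySem.List.pyRange (0 + 1) (monkey_map.length : Int) 1, ?_, ?_⟩
    · unfold pvOrder
      have h2 : r + 1 = (monkey_map.length : Int) := by omega
      rw [h2, PySem.List.pyRange_one_eq_nil le_rfl, PySem.List.pyRange_one_cons (by omega)]
      simp
    · unfold pvOrder
      rw [PySem.List.pyRange_one_succ_right (le_refl (0:Int)), PySem.List.pyRange_one_eq_nil le_rfl]
      simp

-- A's recursion from a row inside the map follows the wrap order
theorem A_pos (monkey_map : List String) (r0 c0 c : Int) :
    ∀ (fuel : Nat) (r : Int) (l1 : List Int) (i : Int) (l2 : List Int),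
      0 ≤ r → r < (monkey_map.length : Int) →
      pvOrder monkey_map r = l1 ++ i :: l2 →
      (∀ x ∈ l1, pvBlankB (pvCell monkey_map x c) = true) →
      pvStopB (pvCell monkey_map i c) = true →
      l1.length < fuel →
      updSouthGo monkey_map r0 c0 c fuel r = pvRes monkey_map r0 c0 c i := by
  intro fuel
  induction fuel with
  | zero => intro r l1 i l2 _ _ _ _ _ hf; omega
  | succ m ih =>
    intro r l1 i l2 h0 h1 hdec hblank hstop hf
    obtain ⟨t, hOr, hOnr⟩ := order_rot monkey_map r h0 h1
    rw [hdec] at hOr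
    by_cases hlt : r < (monkey_map.length : Int) - 1
    · simp only [if_pos hlt] at hOr hOnr
      cases l1 with
      | nil =>
        obtain ⟨hi, -⟩ := List.cons_eq_cons.mp (List.nil_append _ ▸ hOr)
        rcases pvStop_cases hstop with hs | hs <;>
          simp [updSouthGo, if_pos hlt, ← hi, hs, pvRes]
      | cons x l1' =>
        obtain ⟨hx, ht⟩ := List.cons_eq_cons.mp (List.cons_append .. ▸ hOr)
        obtain ⟨ch, hc, hd, hh⟩ := pvBlank_cases (hblank x (by simp))
        rw [hx] at hc
        simp only [updSouthGo, if_pos hlt, hc, if_neg hd, if_neg hh]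
        refine ih (r + 1) l1' i (l2 ++ [r + 1]) (by omega) (by omega) ?_
          (fun y hy => hblank y (by simp [hy])) hstop
          (by simp only [List.length_cons] at hf; omega)
        rw [hOnr, ← ht]
        simp
    · simp only [if_neg hlt] at hOr hOnr
      cases l1 with
      | nil =>
        obtain ⟨hi, -⟩ := List.cons_eq_cons.mp (List.nil_append _ ▸ hOr)
        rcases pvStop_cases hstop with hs | hs <;>
          simp [updSouthGo, if_neg hlt, ← hi, hs, pvRes]
      | cons x l1' =>
        obtain ⟨hx, ht⟩ := List.cons_eq_cons.mp (List.cons_append .. ▸ hOr)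
        obtain ⟨ch, hc, hd, hh⟩ := pvBlank_cases (hblank x (by simp))
        rw [hx] at hc
        simp only [updSouthGo, if_neg hlt, hc, if_neg hd, if_neg hh]
        refine ih 0 l1' i (l2 ++ [0]) le_rfl (by omega) ?_
          (fun y hy => hblank y (by simp [hy])) hstop
          (by simp only [List.length_cons] at hf; omega)
        rw [hOnr, ← ht]
        simp

-- A's recursion from a negative row climbs through range(r+1, n)
theorem A_neg (monkey_map : List String) (r0 c0 c : Int) :
    ∀ (fuel : Nat) (r : Int) (l1 : List Int) (i : Int) (l2 : List Int),
      r < 0 →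
      PySem.List.pyRange (r + 1) (monkey_map.length : Int) 1 = l1 ++ i :: l2 →
      (∀ x ∈ l1, pvBlankB (pvCell monkey_map x c) = true) →
      pvStopB (pvCell monkey_map i c) = true →
      l1.length < fuel →
      updSouthGo monkey_map r0 c0 c fuel r = pvRes monkey_map r0 c0 c i := by
  intro fuel
  induction fuel with
  | zero => intro r l1 i l2 _ _ _ _ hf; omega
  | succ m ih =>
    intro r l1 i l2 hr hdec hblank hstop hf
    have hne : monkey_map ≠ [] := by
      obtain ⟨row, hrow⟩ := pvSome_of_stop hstop
      exact List.ne_nil_of_mem (PySem.List.mem_of_pyGet?_eq_some _ hrow)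
    have hn1 : 1 ≤ (monkey_map.length : Int) := by
      have := List.length_pos_iff.mpr hne; omega
    have hlt : r < (monkey_map.length : Int) - 1 := by omega
    rw [PySem.List.pyRange_one_cons (by omega)] at hdec
    cases l1 with
    | nil =>
      obtain ⟨hi, -⟩ := List.cons_eq_cons.mp (List.nil_append _ ▸ hdec.symm)
      rcases pvStop_cases hstop with hs | hs <;>
        simp [updSouthGo, if_pos hlt, ← hi, hs, pvRes]
    | cons x l1' =>
      obtain ⟨hx, ht⟩ := List.cons_eq_cons.mp (List.cons_append .. ▸ hdec.symm)
      obtain ⟨ch, hc, hd, hh⟩ := pvBlank_cases (hblank x (by simp))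
      rw [hx] at hc
      simp only [updSouthGo, if_pos hlt, hc, if_neg hd, if_neg hh]
      by_cases hneg : r + 1 < 0
      · exact ih (r + 1) l1' i l2 hneg ht.symm
          (fun y hy => hblank y (by simp [hy])) hstop
          (by simp only [List.length_cons] at hf; omega)
      · have hz : r + 1 = 0 := by omega
        rw [hz]
        refine A_pos monkey_map r0 c0 c m 0 l1' i (l2 ++ [0]) le_rfl (by omega) ?_
          (fun y hy => hblank y (by simp [hy])) hstop
          (by simp only [List.length_cons] at hf; omega)
        unfold pvOrder
        rw [PySem.List.pyRange_one_succ_right (le_refl (0:Int)), PySem.List.pyRange_one_eq_nil le_rfl]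
        rw [← hz, ← ht]
        simp

-- generic first-stop decomposition of a list from the index form of Pre_
theorem decomp_of_index (O : List Int) (j : Nat) (hj : j < O.length) :
    O = O.take j ++ O.getD j 0 :: O.drop (j + 1) := by
  rw [List.getD_eq_getElem O 0 hj, ← List.drop_eq_getElem_cons hj, List.take_append_drop]

theorem blank_of_take (monkey_map : List String) (c : Int) (O : List Int) (j : Nat)
    (hblank : ∀ k : Nat, k < j → pvBlankB (pvCell monkey_map (O.getD k 0) c) = true) :
    ∀ x ∈ O.take j, pvBlankB (pvCell monkey_map x c) = true := by
  intro x hx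
  obtain ⟨k, hk, hget⟩ := List.getElem_of_mem hx
  have hmin : (List.take j O).length = min j O.length := List.length_take
  have hk' : k < j := by omega
  have hkO : k < O.length := by omega
  have : O.getD k 0 = x := by
    rw [List.getD_eq_getElem _ 0 hkO, ← hget, List.getElem_take]
  rw [← this]
  exact hblank k hk'

-- ===== VERDICT (by name: the statement is the Claim_ definition above) =====
theorem update_south_spec : Claim_equal_update_south := by
  intro monkey_map r0 c0 r c _ hpre
  obtain ⟨j, hj, hstop, hblank⟩ := hpre
  unfold Spec_update_south
  -- the map is nonempty (the stopping cell exists) and its length is positive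
  have hne : monkey_map ≠ [] := by
    obtain ⟨row, hrow⟩ := pvSome_of_stop hstop
    exact List.ne_nil_of_mem (PySem.List.mem_of_pyGet?_eq_some _ hrow)
  have hn1 : 1 ≤ (monkey_map.length : Int) := by
    have := List.length_pos_iff.mpr hne; omega
  have hfuel : monkey_map.length + 1 + r.natAbs = (monkey_map.length + r.natAbs) + 1 := by omega
  by_cases hr0 : r < 0
  · -- the clamps are inactive: the first scanned cell exists, so -n ≤ r+1
    have hrlow : -(monkey_map.length : Int) ≤ r + 1 := by
      by_contra hco
      set s := max (r + 1) (-(monkey_map.length : Int) - 1) with hs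
      have hsne : s < (monkey_map.length : Int) := by omega
      have hC0 : (pvOrderC monkey_map r).getD 0 0 = s := by
        unfold pvOrderC
        rw [← hs, PySem.List.pyRange_one_cons (by omega)]
        simp
      have hsbad : pvCell monkey_map s c = none := by
        unfold pvCell
        rw [(PySem.List.pyGet?_eq_none_iff monkey_map s).mpr (by unfold PySem.Raise.InRange; omega)]
      cases j with
      | zero => rw [hC0, hsbad] at hstop; simp [pvStopB] at hstop
      | succ j' =>
        have := hblank 0 (Nat.succ_pos j')
        rw [hC0, hsbad] at this; simp [pvBlankB] at this
    have hCO : pvOrderC monkey_map r = pvOrder monkey_map r := by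
      unfold pvOrderC pvOrder
      rw [max_eq_left (by omega), min_eq_left (by omega)]
    rw [hCO] at hj hstop hblank
    have hO : pvOrder monkey_map r = PySem.List.pyRange (r + 1) (monkey_map.length : Int) 1 := by
      unfold pvOrder
      rw [PySem.List.pyRange_one_eq_nil (by omega : r + 1 ≤ 0)]
      simp
    have hdec := decomp_of_index (pvOrder monkey_map r) j hj
    have hB := alt_eq_of_scanL monkey_map r0 c0 r c _ (by
      conv_lhs => rw [hdec]
      exact scanL_spec monkey_map r0 c0 c _ _ _
        (blank_of_take monkey_map c (pvOrder monkey_map r) j hblank) hstop)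
    rw [hB]
    unfold update_south
    refine A_neg monkey_map r0 c0 c _ r _ _ _ hr0 (by rw [← hO]; exact hdec)
      (blank_of_take monkey_map c (pvOrder monkey_map r) j hblank) hstop ?_
    have h1 := List.length_take_le j (pvOrder monkey_map r)
    have h2 : (pvOrder monkey_map r).length
        = ((monkey_map.length : Int) - (r + 1)).toNat + (r + 1 - 0).toNat := by
      simp [pvOrder, PySem.List.length_pyRange_one]
    have hmin : (List.take j (pvOrder monkey_map r)).length
        = min j (pvOrder monkey_map r).length := List.length_take
    omega
  · by_cases hrn : r < (monkey_map.length : Int)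
    · have hCO : pvOrderC monkey_map r = pvOrder monkey_map r := by
        unfold pvOrderC pvOrder
        rw [max_eq_left (by omega), min_eq_left (by omega)]
      rw [hCO] at hj hstop hblank
      have hdec := decomp_of_index (pvOrder monkey_map r) j hj
      have hB := alt_eq_of_scanL monkey_map r0 c0 r c _ (by
        conv_lhs => rw [hdec]
        exact scanL_spec monkey_map r0 c0 c _ _ _
          (blank_of_take monkey_map c (pvOrder monkey_map r) j hblank) hstop)
      rw [hB]
      unfold update_south
      refine A_pos monkey_map r0 c0 c _ r _ _ _ (by omega) hrn hdec
        (blank_of_take monkey_map c (pvOrder monkey_map r) j hblank) hstop ?_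
      have h1 := List.length_take_le j (pvOrder monkey_map r)
      have h2 : (pvOrder monkey_map r).length
          = ((monkey_map.length : Int) - (r + 1)).toNat + (r + 1 - 0).toNat := by
        simp [pvOrder, PySem.List.length_pyRange_one]
      have hmin : (List.take j (pvOrder monkey_map r)).length
          = min j (pvOrder monkey_map r).length := List.length_take
      omega
    · -- r ≥ n: the order is range(0, r+1), clamped in Pre_ to range(0, n+1)
      have hC : pvOrderC monkey_map r
          = PySem.List.pyRange 0 ((monkey_map.length : Int) + 1) 1 := by
        unfold pvOrderC
        rw [max_eq_left (by omega), PySem.List.pyRange_one_eq_nil (by omega),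
          min_eq_right (by omega)]
        simp
      have hClen : (pvOrderC monkey_map r).length = monkey_map.length + 1 := by
        rw [hC, PySem.List.length_pyRange_one]; omega
      have hgd : ∀ k : Nat, k < monkey_map.length + 1 →
          (pvOrderC monkey_map r).getD k 0 = (k : Int) := by
        intro k hk
        rw [hC, List.getD_eq_getElem _ 0 (by rw [PySem.List.length_pyRange_one]; omega),
          PySem.List.getElem_pyRange_one]
        simp
      have hgj : (pvOrderC monkey_map r).getD j 0 = (j : Int) := hgd j (by omega)
      rw [hgj] at hstop
      -- the stopping row is a real row: j < n
      have hjn : (j : Int) < (monkey_map.length : Int) := by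
        obtain ⟨row, hrow⟩ := pvSome_of_stop hstop
        exact (pvInRange_of_some hrow).2
      -- blanks transferred to integer row indices
      have hblank' : ∀ x : Int, 0 ≤ x → x < (j : Int) →
          pvBlankB (pvCell monkey_map x c) = true := by
        intro x hx0 hxj
        have hxk : x = ((x.toNat : Nat) : Int) := by omega
        have := hblank x.toNat (by omega)
        rw [hgd x.toNat (by omega)] at this
        rwa [hxk]
      -- B's side: scan of the real order range(0, r+1) stops at row j
      have hB : update_south_alt monkey_map r0 c0 r c = pvRes monkey_map r0 c0 c (j : Int) := by
        refine alt_eq_of_scanL monkey_map r0 c0 r c _ ?_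
        have hO : pvOrder monkey_map r
            = PySem.List.pyRange 0 (j : Int) 1 ++ (j : Int) :: PySem.List.pyRange ((j : Int) + 1) (r + 1) 1 := by
          unfold pvOrder
          rw [PySem.List.pyRange_one_eq_nil (by omega),
            PySem.List.pyRange_one_append 0 (j : Int) (r + 1) (by omega) (by omega),
            PySem.List.pyRange_one_cons (by omega : (j : Int) < r + 1)]
          simp
        rw [hO]
        refine scanL_spec monkey_map r0 c0 c _ _ _ ?_ hstop
        intro x hx
        rw [PySem.List.mem_pyRange_one] at hx
        exact hblank' x hx.1 hx.2
      rw [hB]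
      unfold update_south
      have hnlt : ¬ (r < (monkey_map.length : Int) - 1) := by omega
      rw [hfuel]
      cases j with
      | zero =>
        rcases pvStop_cases hstop with hs | hs <;>
        · have hs0 : pvCell monkey_map 0 c = _ := (by exact_mod_cast hs)
          simp [updSouthGo, if_neg hnlt, hs0, pvRes]
      | succ j' =>
        -- row 0 is blank; A steps to row 0 and then follows the wrap order from 0
        obtain ⟨ch, hc, hd, hh⟩ := pvBlank_cases (hblank' 0 le_rfl (by omega))
        simp only [updSouthGo, if_neg hnlt, hc, if_neg hd, if_neg hh]
        refine A_pos monkey_map r0 c0 c _ 0 (PySem.List.pyRange 1 ((j' + 1 : Nat) : Int) 1)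
          ((j' + 1 : Nat) : Int)
          (PySem.List.pyRange (((j' + 1 : Nat) : Int) + 1) (monkey_map.length : Int) 1 ++ [0])
          le_rfl (by omega) ?_ ?_ hstop ?_
        · unfold pvOrder
          rw [PySem.List.pyRange_one_succ_right (le_refl (0:Int)), PySem.List.pyRange_one_eq_nil le_rfl,
            PySem.List.pyRange_one_append (0 + 1) ((j' + 1 : Nat) : Int) (monkey_map.length : Int)
              (by omega) (by omega),
            PySem.List.pyRange_one_cons (by omega : ((j' + 1 : Nat) : Int) < (monkey_map.length : Int))]
          simp
        · intro x hx
          rw [PySem.List.mem_pyRange_one] at hx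
          exact hblank' x (by omega) (by exact_mod_cast hx.2)
        · rw [PySem.List.length_pyRange_one]
          omega
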